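-- pv_equiv track=rewrite | github.com/cgycorey/ai-news | src/ai_news/cli.py | _process_arbitrary_topics
-- ===== SOURCE A (Python) =====
-- from typing import List
--
-- def _process_arbitrary_topics(topics: List[str]) -> List[List[str]]:
--     """Process arbitrary topics into logical groups for intersection analysis."""
--     topic_groups = []
--     current_group = []
--
--     for topic in topics:
--         # If topic contains spaces, treat as single topic in its own group
--         if ' ' in topic:
--             if current_group:
--                 topic_groups.append(current_group)
--                 current_group = []
--             topic_groups.append([topic])
--         else:
--             current_group.append(topic)
--             # Group every 3 single-word topics together
--             if len(current_group) >= 3: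
--                 topic_groups.append(current_group)
--                 current_group = []
--
--     # Add remaining topics
--     if current_group:
--         topic_groups.append(current_group)
--
--     # If no groups were created, put all topics in one group
--     if not topic_groups and topics:
--         topic_groups.append([topics[0]] if len(topics) == 1 else topics[:2])
--
--     return topic_groups
-- ===== SOURCE B (Python) =====
-- from typing import List
--
--
-- def _process_arbitrary_topics(topics: List[str]) -> List[List[str]]:
--     """Two-pass index scan: emit spaced topics as singleton groups; slice each
--     maximal run of space-free topics into consecutive chunks of 3 by stepped slicing."""
--     groups = []
--     i = 0
--     n = len(topics)
--     while i < n: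
--         t = topics[i]
--         if ' ' in t:
--             groups.append([t])
--             i += 1
--         else:
--             # scan the whole maximal run of space-free topics
--             j = i
--             while j < n and ' ' not in topics[j]:
--                 j += 1
--             run = topics[i:j]
--             for k in range(0, len(run), 3):
--                 groups.append(run[k:k + 3])
--             i = j
--     return groups
-- ===== Notes on version B (the rewrite author's own statement) =====
-- stated objective: alternative
-- what changed: Replaces A's single stateful fold (pending-group accumulator flushed at size 3 or at a spaced topic, plus a dead final fallback branch) with a two-pass scan: find each maximal run of space-free topics by an inner index scan, then slice it into chunks of 3; spaced topics become singleton groups directly.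
import Mathlib
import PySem

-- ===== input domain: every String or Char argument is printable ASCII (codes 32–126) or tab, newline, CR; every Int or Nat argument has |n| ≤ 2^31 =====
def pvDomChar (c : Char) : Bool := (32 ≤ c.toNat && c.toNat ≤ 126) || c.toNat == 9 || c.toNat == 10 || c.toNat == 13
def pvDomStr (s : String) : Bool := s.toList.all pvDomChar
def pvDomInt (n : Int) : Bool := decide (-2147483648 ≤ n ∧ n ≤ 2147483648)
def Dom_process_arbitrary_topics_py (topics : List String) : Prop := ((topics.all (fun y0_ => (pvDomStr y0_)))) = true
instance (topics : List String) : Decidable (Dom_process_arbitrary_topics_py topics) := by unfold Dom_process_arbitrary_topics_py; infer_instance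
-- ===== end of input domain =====

-- B replaces A's stateful fold (pending group flushed at size 3 or at a spaced topic) with a
-- two-pass scan: maximal space-free runs found by an inner scan, then sliced into chunks of 3.

-- ===== PORT A =====
-- ' ' in topic  (the same test appears in both Pythons)
def pvHasSpace (t : String) : Bool := PySem.Str.isIn " " t

-- loop body of A: state = (topic_groups, current_group)
def pvAStep (st : List (List String) × List String) (t : String) : List (List String) × List String :=
  if pvHasSpace t then
    ((if st.2 = [] then st.1 else st.1 ++ [st.2]) ++ [[t]], [])
  else
    let cur := st.2 ++ [t]
    if 3 ≤ cur.length then (st.1 ++ [cur], []) else (st.1, cur)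

def process_arbitrary_topics_py (topics : List String) : List (List String) :=
  let st := topics.foldl pvAStep ([], [])
  let groups := if st.2 = [] then st.1 else st.1 ++ [st.2]
  if groups = [] ∧ topics ≠ [] then
    groups ++ [if topics.length = 1 then [(PySem.List.pyGet? topics 0).getD ""] else PySem.List.slice topics none (some 2)]
  else groups

-- ===== PORT B =====
-- inner 'for k in range(0, len(run), 3): groups.append(run[k:k + 3])'
def pvChunksF (run : List String) : List (List String) :=
  (PySem.List.pyRange 0 (run.length : Int) 3).foldl
    (fun acc k => acc ++ [PySem.List.slice run (some k) (some (k + 3))]) []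

-- outer while loop over the index i: each step handles either one spaced topic (i += 1) or the
-- inner scan 'while j < n and ' ' not in topics[j]' (= takeWhile/dropWhile of the remaining suffix)
def process_arbitrary_topics_py_alt (topics : List String) : List (List String) :=
  match topics with
  | [] => []
  | t :: ts =>
    if h : pvHasSpace t then [t] :: process_arbitrary_topics_py_alt ts
    else
      pvChunksF ((t :: ts).takeWhile (fun x => !pvHasSpace x)) ++
        process_arbitrary_topics_py_alt ((t :: ts).dropWhile (fun x => !pvHasSpace x))
  termination_by topics.length
  decreasing_by
  · simp
  · simp only [List.dropWhile_cons, h, Bool.not_false, if_pos, List.length_cons]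
    exact Nat.lt_succ_of_le (List.length_dropWhile_le _ _)

-- ===== PRECONDITION & SPEC =====
def Spec_process_arbitrary_topics_py (topics : List String) (out : List (List String)) : Prop := out = process_arbitrary_topics_py_alt topics
instance (topics : List String) (out : List (List String)) : Decidable (Spec_process_arbitrary_topics_py topics out) := by unfold Spec_process_arbitrary_topics_py; infer_instance

-- ===== CLAIM (what is proved, stated in full; the proofs are below) =====
def Claim_equal_process_arbitrary_topics_py : Prop := ∀ (topics : List String), Dom_process_arbitrary_topics_py topics → Spec_process_arbitrary_topics_py topics (process_arbitrary_topics_py topics)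

-- ===== LEMMAS AND PROOFS =====

-- proof-side recursive view of B's chunking loop
def pvChunks : List String → List (List String)
  | [] => []
  | x :: xs => ((x :: xs).take 3) :: pvChunks ((x :: xs).drop 3)
  termination_by l => l.length
  decreasing_by simp

lemma pvRangeChunks (l : List String) :
    (List.range ((l.length + 2) / 3)).map (fun k => (l.drop (3 * k)).take 3) = pvChunks l := by
  induction l using pvChunks.induct with
  | case1 => simp [pvChunks]
  | case2 x xs ih =>
    rw [pvChunks, ← ih]
    have hm : ((x :: xs).length + 2) / 3 = ((((x :: xs).drop 3).length + 2) / 3) + 1 := by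
      simp only [List.length_cons, List.length_drop]
      omega
    rw [hm, List.range_succ_eq_map, List.map_cons, List.map_map]
    refine congrArg₂ List.cons (by simp) ?_
    apply List.map_congr_left
    intro a _
    have h3 : 3 * (a + 1) = 3 * a + 3 := by ring
    simp only [Function.comp_apply, Nat.succ_eq_add_one, List.drop_drop, h3, Nat.add_comm]

lemma pvChunksF_eq (l : List String) : pvChunksF l = pvChunks l := by
  unfold pvChunksF
  rw [PySem.List.pyRange_of_pos 0 (l.length : Int) (by norm_num),
      List.foldl_map, PySem.List.foldl_append_singleton_eq_map, ← pvRangeChunks]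
  have hcnt : (if (0 : Int) < (l.length : Int) then (((l.length : Int) - 0 + 3 - 1) / 3).toNat else 0)
      = (l.length + 2) / 3 := by
    split_ifs with h
    · have h1 : ((l.length : Int) - 0 + 3 - 1) = ((l.length + 2 : Nat) : Int) := by push_cast; ring
      rw [h1, show ((3 : Int)) = ((3 : Nat) : Int) from rfl, ← Int.natCast_div, Int.toNat_natCast]
    · omega
  rw [hcnt]
  apply List.map_congr_left
  intro k _
  have h1 : (0 : Int) + 3 * (k : Int) = ((3 * k : Nat) : Int) := by push_cast; ring
  rw [h1]
  simpa using PySem.List.slice_natCast_add l (3 * k) 3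

-- recursive restatement of A's fold-and-flush
def pvASpec : List String → List String → List (List String)
  | cur, [] => if cur = [] then [] else [cur]
  | cur, t :: ts =>
    if pvHasSpace t then (if cur = [] then [] else [cur]) ++ [t] :: pvASpec [] ts
    else if 3 ≤ (cur ++ [t]).length then (cur ++ [t]) :: pvASpec [] ts
    else pvASpec (cur ++ [t]) ts

lemma pvFoldA (ts : List String) : ∀ (gs : List (List String)) (cur : List String),
    (let st := ts.foldl pvAStep (gs, cur);
     if st.2 = [] then st.1 else st.1 ++ [st.2]) = gs ++ pvASpec cur ts := by
  induction ts with
  | nil => intro gs cur; simp only [List.foldl_nil, pvASpec]; split_ifs <;> simp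
  | cons t ts ih =>
    intro gs cur
    simp only [List.foldl_cons, pvASpec, pvAStep]
    by_cases hs : pvHasSpace t
    · simp only [hs, if_true, ih]
      split_ifs <;> simp
    · by_cases h3 : 3 ≤ (cur ++ [t]).length
      · simp only [hs, if_false, h3, if_true, Bool.false_eq_true, ih]
        simp
      · simp only [hs, if_false, h3, if_false, Bool.false_eq_true, ih]

lemma pvASpec_ne_nil (ts : List String) : ∀ cur, cur ≠ [] ∨ ts ≠ [] → pvASpec cur ts ≠ [] := by
  induction ts with
  | nil =>
    intro cur h
    simp only [pvASpec]
    rcases h with h | h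
    · simp [h]
    · exact absurd rfl h
  | cons t ts ih =>
    intro cur _
    simp only [pvASpec]
    by_cases hs : pvHasSpace t
    · simp [hs]
    · by_cases h3 : 3 ≤ (cur ++ [t]).length
      · simp only [hs, Bool.false_eq_true, if_false, h3, if_true]
        simp
      · simp only [hs, if_false, h3, if_false, Bool.false_eq_true]
        exact ih _ (Or.inl (by simp))

lemma pvChunks_small (l : List String) (h0 : l ≠ []) (h3 : l.length ≤ 3) : pvChunks l = [l] := by
  match l with
  | [] => exact absurd rfl h0
  | x :: xs =>
    rw [pvChunks]
    have hd : (x :: xs).drop 3 = [] := List.drop_eq_nil_of_le (by simpa using h3)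
    have ht : (x :: xs).take 3 = x :: xs := List.take_of_length_le (by simpa using h3)
    rw [hd, ht, pvChunks]

lemma pvChunks_cons (l r : List String) (h : l.length = 3) : pvChunks (l ++ r) = l :: pvChunks r := by
  match l, h with
  | a :: b :: c :: [], _ =>
    show pvChunks (a :: b :: c :: r) = _
    rw [pvChunks]
    simp [List.take, List.drop]

lemma pvAlt_cons_space (c : String) (rest : List String) (hc : pvHasSpace c = true) :
    process_arbitrary_topics_py_alt (c :: rest) = [c] :: process_arbitrary_topics_py_alt rest := by
  rw [process_arbitrary_topics_py_alt]
  simp [hc]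

lemma pvAlt_cons_nospace (c : String) (rest : List String) (hc : pvHasSpace c = false) :
    process_arbitrary_topics_py_alt (c :: rest) =
      pvChunks ((c :: rest).takeWhile (fun x => !pvHasSpace x)) ++
        process_arbitrary_topics_py_alt ((c :: rest).dropWhile (fun x => !pvHasSpace x)) := by
  rw [process_arbitrary_topics_py_alt]
  simp [hc, pvChunksF_eq]

lemma pvAlt_span (ts : List String) :
    process_arbitrary_topics_py_alt ts =
      pvChunks (ts.takeWhile (fun x => !pvHasSpace x)) ++
        process_arbitrary_topics_py_alt (ts.dropWhile (fun x => !pvHasSpace x)) := by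
  match ts with
  | [] => simp [process_arbitrary_topics_py_alt, pvChunks]
  | t :: ts =>
    by_cases hs : pvHasSpace t
    · simp [hs, pvChunks]
    · exact pvAlt_cons_nospace t ts (by simpa using hs)

lemma pvMain (ts : List String) : ∀ cur, cur.length ≤ 2 → (∀ x ∈ cur, pvHasSpace x = false) →
    pvASpec cur ts = process_arbitrary_topics_py_alt (cur ++ ts) := by
  induction ts with
  | nil =>
    intro cur hlen hall
    match cur, hlen, hall with
    | [], _, _ => simp [pvASpec, process_arbitrary_topics_py_alt]
    | c :: cs, hlen, hall =>
      have hc : pvHasSpace c = false := hall c (by simp)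
      have hp : ∀ x ∈ c :: cs, (fun x => !pvHasSpace x) x = true := by
        intro x hx; simp [hall x hx]
      rw [List.append_nil, pvAlt_cons_nospace c cs hc]
      have htw : (c :: cs).takeWhile (fun x => !pvHasSpace x) = c :: cs := by
        simpa using List.takeWhile_append_of_pos (l₂ := ([] : List String)) hp
      have hdw : (c :: cs).dropWhile (fun x => !pvHasSpace x) = [] := by
        simpa using List.dropWhile_append_of_pos (l₂ := ([] : List String)) hp
      rw [htw, hdw, pvChunks_small _ (by simp) (by simp at hlen ⊢; omega)]
      simp [pvASpec, process_arbitrary_topics_py_alt]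
  | cons t ts ih =>
    intro cur hlen hall
    by_cases hs : pvHasSpace t
    · have hA : pvASpec cur (t :: ts) =
          (if cur = [] then [] else [cur]) ++ [t] :: pvASpec [] ts := by
        simp [pvASpec, hs]
      rw [hA, ih [] (by simp) (by simp)]
      match cur, hlen, hall with
      | [], _, _ => simp [pvAlt_cons_space t ts hs]
      | c :: cs, hlen, hall =>
        have hc : pvHasSpace c = false := hall c (by simp)
        have hp : ∀ x ∈ c :: cs, (fun x => !pvHasSpace x) x = true := by
          intro x hx; simp [hall x hx]
        rw [List.cons_append, pvAlt_cons_nospace c (cs ++ t :: ts) hc, ← List.cons_append,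
            List.takeWhile_append_of_pos hp, List.dropWhile_append_of_pos hp,
            List.takeWhile_cons_of_neg (by simp [hs]), List.dropWhile_cons_of_neg (by simp [hs]),
            List.append_nil, pvChunks_small _ (by simp) (by simp at hlen ⊢; omega),
            pvAlt_cons_space t ts hs]
        simp
    · by_cases h3 : 3 ≤ (cur ++ [t]).length
      · match cur, hlen, hall, h3 with
        | c :: cs, hlen, hall, h3 =>
          have hlen3 : ((c :: cs) ++ [t]).length = 3 := by
            simp at h3 hlen ⊢; omega
          have hA : pvASpec (c :: cs) (t :: ts) = ((c :: cs) ++ [t]) :: pvASpec [] ts := by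
            simp only [pvASpec]
            rw [if_neg hs, if_pos h3]
          rw [hA, ih [] (by simp) (by simp)]
          have hc : pvHasSpace c = false := hall c (by simp)
          have hp : ∀ x ∈ (c :: cs) ++ [t], (fun x => !pvHasSpace x) x = true := by
            intro x hx
            rcases List.mem_append.1 hx with hx | hx
            · simp [hall x hx]
            · simp at hx; simp [hx, hs]
          conv_rhs => rw [List.cons_append, pvAlt_cons_nospace c (cs ++ t :: ts) hc]
          have hrw2 : c :: (cs ++ t :: ts) = ((c :: cs) ++ [t]) ++ ts := by simp
          rw [hrw2, List.takeWhile_append_of_pos hp, List.dropWhile_append_of_pos hp,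
              pvChunks_cons _ _ hlen3]
          simp [← pvAlt_span ts]
      · have hA : pvASpec cur (t :: ts) = pvASpec (cur ++ [t]) ts := by
          simp only [pvASpec]
          rw [if_neg hs, if_neg h3]
        have hlen' : (cur ++ [t]).length ≤ 2 := by
          simp only [List.length_append, List.length_cons, List.length_nil] at h3 ⊢; omega
        have hall' : ∀ x ∈ cur ++ [t], pvHasSpace x = false := by
          intro x hx
          rcases List.mem_append.1 hx with hx | hx
          · exact hall x hx
          · simp at hx; simpa [hx] using hs
        rw [hA, ih (cur ++ [t]) hlen' hall']
        simp

-- ===== VERDICT (by name: the statement is the Claim_ definition above) =====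
theorem process_arbitrary_topics_py_spec : Claim_equal_process_arbitrary_topics_py := by
  intro topics _
  unfold Spec_process_arbitrary_topics_py process_arbitrary_topics_py
  simp only [pvFoldA topics [] [], List.nil_append]
  rcases eq_or_ne topics [] with rfl | hne
  · simp [pvASpec, process_arbitrary_topics_py_alt]
  · have h := pvASpec_ne_nil topics [] (Or.inr hne)
    simp [h, hne]
    simpa using pvMain topics [] (by simp) (by simp)
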